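-- pv_equiv track=rewrite | github.com/aviswerdlow/k4 | 04_EXPERIMENTS/phase3_zone/key_fit/path_transforms.py | ring24_path
-- ===== SOURCE A (Python) =====
-- def ring24_path(text: str) -> str:
--     """
--     Ring24 path: 24×4 grid, read in ring pattern
--     Matches Weltzeituhr 24-hour structure
--     Special handling for K4's 97 characters
--     """
--     n = len(text)
--     rows = 4
--     cols = 24
--     grid_size = rows * cols  # 96
--
--     # For K4's 97 chars, we'll handle the extra char specially
--     padded = text
--     if n < grid_size:
--         padded = text + 'X' * (grid_size - n)
--     elif n > grid_size:
--         # Save extra char(s) for later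
--         extra = text[grid_size:]
--         padded = text[:grid_size]
--
--     # Write into 24×4 grid column by column
--     grid = []
--     for r in range(rows):
--         row = []
--         for c in range(cols):
--             idx = c * rows + r
--             if idx < len(padded):
--                 row.append(padded[idx])
--             else:
--                 row.append('X')
--         grid.append(row)
--
--     # Read in ring pattern: outer ring, then inner rings
--     result = []
--
--     # Outer ring (clockwise)
--     # Top row left to right
--     for c in range(cols):
--         result.append(grid[0][c])
--     # Right column top to bottom (skip corner)
--     for r in range(1, rows):
--         result.append(grid[r][cols-1])
--     # Bottom row right to left (skip corner)
--     for c in range(cols-2, -1, -1):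
--         result.append(grid[rows-1][c])
--     # Left column bottom to top (skip corners)
--     for r in range(rows-2, 0, -1):
--         result.append(grid[r][0])
--
--     # Inner rings (if any remain)
--     if rows > 2 and cols > 2:
--         # Second ring
--         for c in range(1, cols-1):
--             result.append(grid[1][c])
--         for c in range(cols-2, 0, -1):
--             result.append(grid[2][c])
--
--     # For K4's 97th character, append it at the end
--     result_text = ''.join(result)
--     if n > grid_size:
--         result_text += extra
--
--     return result_text[:n]
-- ===== SOURCE B (Python) =====
-- def ring24_path(text: str) -> str:
--     """Generic spiral traversal over the 4x24 column-major grid (same padding as A)."""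
--     n = len(text)
--     rows = 4
--     cols = 24
--     grid_size = rows * cols  # 96
--     extra = ''
--     padded = text
--     if n < grid_size:
--         padded = text + 'X' * (grid_size - n)
--     elif n > grid_size:
--         extra = text[grid_size:]
--         padded = text[:grid_size]
--     grid = [[padded[c * rows + r] for c in range(cols)] for r in range(rows)]
--     result = []
--     top, bottom, left, right = 0, rows - 1, 0, cols - 1
--     while top <= bottom and left <= right:
--         for c in range(left, right + 1):
--             result.append(grid[top][c])
--         for r in range(top + 1, bottom + 1):
--             result.append(grid[r][right])
--         if top < bottom:
--             for c in range(right - 1, left - 1, -1):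
--                 result.append(grid[bottom][c])
--         if left < right:
--             for r in range(bottom - 1, top, -1):
--                 result.append(grid[r][left])
--         top += 1
--         bottom -= 1
--         left += 1
--         right -= 1
--     result_text = ''.join(result) + extra
--     return result_text[:n]
-- ===== Notes on version B (the rewrite author's own statement) =====
-- stated objective: simpler
-- what changed: Replaces A's six hardcoded ring-read loops with a single generic boundary-shrinking spiral while-loop over the 4x24 grid (same padding/truncation setup).
import Mathlib
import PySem

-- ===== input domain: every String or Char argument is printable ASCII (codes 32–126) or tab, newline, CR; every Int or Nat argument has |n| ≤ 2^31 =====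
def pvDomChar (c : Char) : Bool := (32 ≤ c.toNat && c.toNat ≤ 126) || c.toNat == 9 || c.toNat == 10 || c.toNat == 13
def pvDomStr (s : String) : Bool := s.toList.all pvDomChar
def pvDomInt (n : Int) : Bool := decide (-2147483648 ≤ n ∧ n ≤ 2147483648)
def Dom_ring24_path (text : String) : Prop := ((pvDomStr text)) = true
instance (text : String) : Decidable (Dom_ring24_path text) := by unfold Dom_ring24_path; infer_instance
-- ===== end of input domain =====

-- B replaces A's six hardcoded ring-read loops by one generic boundary-shrinking spiral loop (objective: simpler/alternative; same cost).

-- ===== PORT A =====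
-- row r of the grid: [grid entry for c in range(24)], idx = c*4+r (rows=4, cols=24 inlined numerals)
def pvGridRowA (padded : List Char) (r : Int) : List Char :=
  (PySem.List.pyRange 0 24 1).foldl
    (fun row c =>
      row ++ [if c * 4 + r < (padded.length : Int) then PySem.List.pyGetD padded (c * 4 + r) 'X' else 'X']) []

def pvGridA (padded : List Char) : List (List Char) :=
  (PySem.List.pyRange 0 4 1).foldl (fun g r => g ++ [pvGridRowA padded r]) []

-- the six ring-read loops of A; grid[r][c] ported as pyGetD (indices provably in range, default unreachable)
def pvReadA (grid : List (List Char)) : List Char :=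
  let result := (PySem.List.pyRange 0 24 1).foldl
    (fun res c => res ++ [PySem.List.pyGetD (PySem.List.pyGetD grid 0 []) c 'X']) []
  let result := (PySem.List.pyRange 1 4 1).foldl
    (fun res r => res ++ [PySem.List.pyGetD (PySem.List.pyGetD grid r []) (24 - 1) 'X']) result
  let result := (PySem.List.pyRange (24 - 2) (-1) (-1)).foldl
    (fun res c => res ++ [PySem.List.pyGetD (PySem.List.pyGetD grid (4 - 1) []) c 'X']) result
  let result := (PySem.List.pyRange (4 - 2) 0 (-1)).foldl
    (fun res r => res ++ [PySem.List.pyGetD (PySem.List.pyGetD grid r []) 0 'X']) result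
  if (4 : Int) > 2 ∧ (24 : Int) > 2 then
    let result := (PySem.List.pyRange 1 (24 - 1) 1).foldl
      (fun res c => res ++ [PySem.List.pyGetD (PySem.List.pyGetD grid 1 []) c 'X']) result
    (PySem.List.pyRange (24 - 2) 0 (-1)).foldl
      (fun res c => res ++ [PySem.List.pyGetD (PySem.List.pyGetD grid 2 []) c 'X']) result
  else result

def ring24_path (text : String) : String :=
  let cs := text.toList
  let n : Int := cs.length
  let gridSize : Int := 4 * 24
  let padded : List Char :=
    if n < gridSize then cs ++ List.replicate (gridSize - n).toNat 'X'
    else if n > gridSize then PySem.List.slice cs none (some gridSize)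
    else cs
  let grid := pvGridA padded
  let result := pvReadA grid
  -- extra = text[grid_size:], appended only when n > grid_size (exactly when Python binds it)
  let resultText := result ++ (if n > gridSize then PySem.List.slice cs (some gridSize) none else [])
  String.ofList (PySem.List.slice resultText none (some n))

-- ===== PORT B =====
def pvGridB (padded : List Char) : List (List Char) :=
  (PySem.List.pyRange 0 4 1).map
    (fun r => (PySem.List.pyRange 0 24 1).map (fun c => PySem.List.pyGetD padded (c * 4 + r) 'X'))

-- B's while loop: boundary-shrinking spiral read (grid[r][c] as pyGetD, indices provably in range)
def pvSpiral (grid : List (List Char)) (top bottom left right : Int) (result : List Char) : List Char :=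
  if h : top ≤ bottom ∧ left ≤ right then
    let result := (PySem.List.pyRange left (right + 1) 1).foldl
      (fun res c => res ++ [PySem.List.pyGetD (PySem.List.pyGetD grid top []) c 'X']) result
    let result := (PySem.List.pyRange (top + 1) (bottom + 1) 1).foldl
      (fun res r => res ++ [PySem.List.pyGetD (PySem.List.pyGetD grid r []) right 'X']) result
    let result := if top < bottom then
        (PySem.List.pyRange (right - 1) (left - 1) (-1)).foldl
          (fun res c => res ++ [PySem.List.pyGetD (PySem.List.pyGetD grid bottom []) c 'X']) result
      else result
    let result := if left < right then
        (PySem.List.pyRange (bottom - 1) top (-1)).foldl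
          (fun res r => res ++ [PySem.List.pyGetD (PySem.List.pyGetD grid r []) left 'X']) result
      else result
    pvSpiral grid (top + 1) (bottom - 1) (left + 1) (right - 1) result
  else result
termination_by (bottom + 1 - top).toNat
decreasing_by omega

def ring24_path_alt (text : String) : String :=
  let cs := text.toList
  let n : Int := cs.length
  let gridSize : Int := 4 * 24
  let extra : List Char := if n > gridSize then PySem.List.slice cs (some gridSize) none else []
  let padded : List Char :=
    if n < gridSize then cs ++ List.replicate (gridSize - n).toNat 'X'
    else if n > gridSize then PySem.List.slice cs none (some gridSize)
    else cs
  let grid := pvGridB padded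
  let result := pvSpiral grid 0 (4 - 1) 0 (24 - 1) []
  String.ofList (PySem.List.slice (result ++ extra) none (some n))

-- ===== PRECONDITION & SPEC =====
def Spec_ring24_path (text : String) (out : String) : Prop := out = ring24_path_alt text
instance (text : String) (out : String) : Decidable (Spec_ring24_path text out) := by unfold Spec_ring24_path; infer_instance

-- ===== CLAIM (what is proved, stated in full; the proofs are below) =====
def Claim_equal_ring24_path : Prop := ∀ (text : String), Dom_ring24_path text → Spec_ring24_path text (ring24_path text)

-- ===== LEMMAS AND PROOFS =====

lemma pvGrid_eq (padded : List Char) (h : padded.length = 96) : pvGridA padded = pvGridB padded := by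
  have h4 : PySem.List.pyRange 0 4 1 = [0, 1, 2, 3] := by decide
  have h24 : PySem.List.pyRange 0 24 1 =
      [0,1,2,3,4,5,6,7,8,9,10,11,12,13,14,15,16,17,18,19,20,21,22,23] := by decide
  simp only [pvGridA, pvGridRowA, pvGridB, h4, h24, List.foldl_cons, List.foldl_nil,
    List.map_cons, List.map_nil, h]
  norm_num

lemma pvRead_eq (grid : List (List Char)) : pvReadA grid = pvSpiral grid 0 3 0 23 [] := by
  rw [pvSpiral]; norm_num
  rw [pvSpiral]; norm_num
  rw [pvSpiral]; norm_num
  simp only [pvReadA]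
  norm_num
  have e1 : PySem.List.pyRange 0 24 1 =
      [0,1,2,3,4,5,6,7,8,9,10,11,12,13,14,15,16,17,18,19,20,21,22,23] := by decide
  have e2 : PySem.List.pyRange 1 4 1 = [1, 2, 3] := by decide
  have e3 : PySem.List.pyRange 22 (-1) (-1) =
      [22,21,20,19,18,17,16,15,14,13,12,11,10,9,8,7,6,5,4,3,2,1,0] := by decide
  have e4 : PySem.List.pyRange 2 0 (-1) = [2, 1] := by decide
  have e5 : PySem.List.pyRange 1 23 1 =
      [1,2,3,4,5,6,7,8,9,10,11,12,13,14,15,16,17,18,19,20,21,22] := by decide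
  have e6 : PySem.List.pyRange 22 0 (-1) =
      [22,21,20,19,18,17,16,15,14,13,12,11,10,9,8,7,6,5,4,3,2,1] := by decide
  have e7 : PySem.List.pyRange 2 3 1 = [2] := by decide
  have e8 : PySem.List.pyRange 21 0 (-1) =
      [21,20,19,18,17,16,15,14,13,12,11,10,9,8,7,6,5,4,3,2,1] := by decide
  have e9 : PySem.List.pyRange 1 1 (-1) = [] := by decide
  simp only [e6, e7, e8, List.map_cons, List.map_nil, List.flatten_cons, List.flatten_nil,
    List.append_nil, List.nil_append, List.cons_append]

-- ===== VERDICT (by name: the statement is the Claim_ definition above) =====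
theorem ring24_path_spec : Claim_equal_ring24_path := by
  intro text _
  unfold Spec_ring24_path ring24_path ring24_path_alt
  by_cases h1 : ((text.toList.length : Int) < 4 * 24)
  · have hng : ¬ ((text.toList.length : Int) > 4 * 24) := by omega
    have hlen : (text.toList ++ List.replicate (((4 * 24 : Int)) - (text.toList.length : Int)).toNat 'X').length = 96 := by
      simp only [List.length_append, List.length_replicate]; omega
    simp only [if_pos h1, if_neg hng]
    rw [pvGrid_eq _ hlen]
    norm_num [pvRead_eq]
  · by_cases h2 : ((text.toList.length : Int) > 4 * 24)
    · have hlen : (PySem.List.slice text.toList none (some (4 * 24 : Int))).length = 96 := by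
        rw [show ((4 * 24 : Int)) = ((96 : Nat) : Int) by norm_num, PySem.List.slice_to_natCast]
        simp only [List.length_take]; omega
      simp only [if_neg h1, if_pos h2]
      rw [pvGrid_eq _ hlen]
      norm_num [pvRead_eq]
    · have hlen : text.toList.length = 96 := by omega
      simp only [if_neg h1, if_neg h2]
      rw [pvGrid_eq _ hlen]
      norm_num [pvRead_eq]
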